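-- pv_equiv track=rewrite | github.com/sgritsaev-dev/pygen_oop | 5/5.9-5.10/hash_function.py | hash_function_2
-- ===== SOURCE A (Python) =====
-- def hash_function_2(string):
--     res = 0
--     for i in range(len(string)):
--         if i % 2 == 0:
--             res += ord(string[i])*(i+1)
--         else:
--             res -= ord(string[i])*(i+1)
--     return res
-- ===== SOURCE B (Python) =====
-- def hash_function_2(string):
--     pos = 0
--     for i in range(0, len(string), 2):
--         pos += ord(string[i]) * (i + 1)
--     neg = 0
--     for i in range(1, len(string), 2):
--         neg += ord(string[i]) * (i + 1)
--     return pos - neg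
-- ===== Notes on version B (the rewrite author's own statement) =====
-- stated objective: alternative
-- what changed: The single index loop with a parity branch is replaced by two branch-free strided passes: one over the even indices (range(0,len,2)) accumulating the positive terms, one over the odd indices (range(1,len,2)) accumulating the negative terms, returning their difference.
import Mathlib
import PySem

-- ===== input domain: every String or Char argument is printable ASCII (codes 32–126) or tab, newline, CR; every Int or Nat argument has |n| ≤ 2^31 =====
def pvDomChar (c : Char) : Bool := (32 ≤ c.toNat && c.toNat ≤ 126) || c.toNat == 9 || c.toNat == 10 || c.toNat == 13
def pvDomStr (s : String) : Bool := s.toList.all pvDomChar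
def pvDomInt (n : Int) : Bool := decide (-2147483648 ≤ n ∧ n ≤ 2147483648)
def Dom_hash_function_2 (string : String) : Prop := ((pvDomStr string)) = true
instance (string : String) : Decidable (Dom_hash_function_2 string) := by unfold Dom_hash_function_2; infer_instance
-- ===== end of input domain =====

-- B replaces the single parity-branching index loop by two branch-free strided passes
-- (even indices, then odd indices) and returns their difference: an alternative decomposition.


-- ===== PORT A =====
-- one loop over range(len(string)); parity branch adds or subtracts ord(string[i])*(i+1)
def hash_function_2 (string : String) : Int :=
  (PySem.List.pyRange 0 (PySem.Str.len string) 1).foldl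
    (fun res i =>
      if PySem.Int.mod i 2 = 0 then
        res + ((PySem.List.pyGetD string.toList i ' ').toNat : Int) * (i + 1)
      else
        res - ((PySem.List.pyGetD string.toList i ' ').toNat : Int) * (i + 1))
    0

-- ===== PORT B =====
-- two strided passes: even indices accumulate pos, odd indices accumulate neg; result pos - neg
def hash_function_2_alt (string : String) : Int :=
  let pos :=
    (PySem.List.pyRange 0 (PySem.Str.len string) 2).foldl
      (fun acc i => acc + ((PySem.List.pyGetD string.toList i ' ').toNat : Int) * (i + 1)) 0
  let neg :=
    (PySem.List.pyRange 1 (PySem.Str.len string) 2).foldl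
      (fun acc i => acc + ((PySem.List.pyGetD string.toList i ' ').toNat : Int) * (i + 1)) 0
  pos - neg

-- ===== PRECONDITION & SPEC =====
def Spec_hash_function_2 (string : String) (out : Int) : Prop := out = hash_function_2_alt string
instance (string : String) (out : Int) : Decidable (Spec_hash_function_2 string out) := by unfold Spec_hash_function_2; infer_instance

-- ===== CLAIM (what is proved, stated in full; the proofs are below) =====
def Claim_equal_hash_function_2 : Prop := ∀ (string : String), Dom_hash_function_2 string → Spec_hash_function_2 string (hash_function_2 string)

-- ===== LEMMAS AND PROOFS =====

-- alternating sum over range n splits into the even-index sum minus the odd-index sum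
lemma pv_key (h : Nat → Int) (n : Nat) :
    ((List.range n).map (fun k => if k % 2 = 0 then h k else -h k)).sum
      = ((List.range ((n + 1) / 2)).map (fun k => h (2 * k))).sum
        - ((List.range (n / 2)).map (fun k => h (2 * k + 1))).sum := by
  induction n with
  | zero => simp
  | succ n ih =>
    rcases Nat.even_or_odd n with he | ho
    · have h0 : n % 2 = 0 := Nat.even_iff.mp he
      have h1 : (n + 2) / 2 = n / 2 + 1 := by omega
      have h2 : (n + 1) / 2 = n / 2 := by omega
      have h3 : 2 * (n / 2) = n := by omega
      rw [List.range_succ, List.map_append, List.sum_append, ih]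
      simp only [h1, h2]
      rw [List.range_succ, List.map_append, List.sum_append]
      simp [h3, h0]
      ring
    · have h0 : n % 2 = 1 := Nat.odd_iff.mp ho
      have h1 : (n + 2) / 2 = (n + 1) / 2 := by omega
      have h2 : (n + 1) / 2 = n / 2 + 1 := by omega
      have h3 : 2 * (n / 2) + 1 = n := by omega
      rw [List.range_succ, List.map_append, List.sum_append, ih]
      simp only [h1, h2]
      simp [List.range_succ, h3, h0]
      ring

-- ===== VERDICT (by name: the statement is the Claim_ definition above) =====
theorem hash_function_2_spec : Claim_equal_hash_function_2 := by
  intro s _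
  unfold Spec_hash_function_2 hash_function_2 hash_function_2_alt
  set xs := s.toList with hxs
  set L := xs.length with hL
  have hlen : PySem.Str.len s = (L : Int) := by simp [PySem.Str.len_eq, hL, hxs]
  set H : Int → Int := fun i => ((PySem.List.pyGetD xs i ' ').toNat : Int) * (i + 1) with hH
  -- A as a sum
  have hA : (PySem.List.pyRange 0 (PySem.Str.len s) 1).foldl
      (fun res i => if PySem.Int.mod i 2 = 0 then res + H i else res - H i) 0
      = ((PySem.List.pyRange 0 (L : Int) 1).map
          (fun i => if PySem.Int.mod i 2 = 0 then H i else -H i)).sum := by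
    rw [hlen]
    have : (fun (res : Int) (i : Int) => if PySem.Int.mod i 2 = 0 then res + H i else res - H i)
        = fun res i => res + (if PySem.Int.mod i 2 = 0 then H i else -H i) := by
      funext res i; split_ifs <;> ring
    rw [this, PySem.List.foldl_add, zero_add]
  -- closed forms of the three ranges
  have hR1 : PySem.List.pyRange 0 (L : Int) 1 = (List.range L).map (fun k => ((k : Nat) : Int)) := by
    rw [PySem.List.pyRange_one]
    have : ((L : Int) - 0).toNat = L := by omega
    rw [this]
    apply List.map_congr_left; intro k _; ring
  have hR2 : PySem.List.pyRange 0 (L : Int) 2 = (List.range ((L + 1) / 2)).map (fun k => ((2 * k : Nat) : Int)) := by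
    rw [PySem.List.pyRange_of_pos 0 (L : Int) (by norm_num)]
    have hc : (if (0 : Int) < (L : Int) then (((L : Int) - 0 + 2 - 1) / 2).toNat else 0) = (L + 1) / 2 := by
      split_ifs with h
      · omega
      · omega
    rw [hc]
    apply List.map_congr_left; intro k _; push_cast; ring
  have hR3 : PySem.List.pyRange 1 (L : Int) 2 = (List.range (L / 2)).map (fun k => ((2 * k + 1 : Nat) : Int)) := by
    rw [PySem.List.pyRange_of_pos 1 (L : Int) (by norm_num)]
    have hc : (if (1 : Int) < (L : Int) then (((L : Int) - 1 + 2 - 1) / 2).toNat else 0) = L / 2 := by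
      split_ifs with h
      · omega
      · omega
    rw [hc]
    apply List.map_congr_left; intro k _; push_cast; ring
  -- B's two passes as sums
  have hpos : (PySem.List.pyRange 0 (PySem.Str.len s) 2).foldl (fun acc i => acc + H i) 0
      = ((List.range ((L + 1) / 2)).map (fun k => H ((2 * k : Nat) : Int))).sum := by
    rw [hlen, PySem.List.foldl_add, zero_add, hR2, List.map_map]; rfl
  have hneg : (PySem.List.pyRange 1 (PySem.Str.len s) 2).foldl (fun acc i => acc + H i) 0
      = ((List.range (L / 2)).map (fun k => H ((2 * k + 1 : Nat) : Int))).sum := by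
    rw [hlen, PySem.List.foldl_add, zero_add, hR3, List.map_map]; rfl
  rw [hA, hpos, hneg, hR1, List.map_map]
  have hcond : ∀ k : Nat, (PySem.Int.mod ((k : Nat) : Int) 2 = 0) ↔ k % 2 = 0 := by
    intro k
    rw [PySem.Int.mod_eq_emod_of_pos (by norm_num : (0:Int) < 2)]
    omega
  have hmapA : ((fun i => if PySem.Int.mod i 2 = 0 then H i else -H i) ∘ fun k : Nat => ((k : Nat) : Int))
      = fun k : Nat => if k % 2 = 0 then H ((k : Nat) : Int) else -H ((k : Nat) : Int) := by
    funext k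
    simp only [Function.comp]
    exact if_congr (hcond k) rfl rfl
  rw [hmapA]
  exact pv_key (fun m : Nat => H ((m : Nat) : Int)) L
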